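-- pv_equiv track=rewrite | github.com/sharhalakis/vdns | src/vdns/zoneparser.py | cleanup_line
-- ===== SOURCE A (Python) =====
-- def cleanup_line(line0: str) -> str:
--     """Cleans a line by removing comments and starting/trailing space."""
--     line = line0
--
--     # If there's a potential comment then scan the whole string char-by-char.
--     # Don't remove quoted semicolons like in 'TXT "v=DKIM1; g=*"'
--     if line.find(';') >= 0:
--         in_st = False   # Are we in a "" block? If yes then ignore ;
--         line = ''
--         for ch in line0:
--             if not in_st and ch == ';':
--                 break
--             line += ch
--             if ch == '"':
--                 in_st = not in_st
--
--     line = line.strip()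
--
--     return line
-- ===== SOURCE B (Python) =====
-- def cleanup_line(line0: str) -> str:
--     """Cleans a line by removing comments and starting/trailing space."""
--     # Even-indexed pieces of split('"') are the text outside double quotes;
--     # the first ';' found there is the comment start.
--     cut = None
--     offset = 0
--     for i, seg in enumerate(line0.split('"')):
--         if i % 2 == 0:
--             p = seg.find(';')
--             if p >= 0:
--                 cut = offset + p
--                 break
--         offset += len(seg) + 1
--     result = line0 if cut is None else line0[:cut]
--     return result.strip()
-- ===== Notes on version B (the rewrite author's own statement) =====
-- stated objective: idiomatic
-- what changed: Replaces the char-by-char quote-state scan that rebuilds the line by accumulation with a segment-level pass: split the line on '"', locate the first ';' in the even-indexed (outside-quotes) segments via str.find, and slice the original line there.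
import Mathlib
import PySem

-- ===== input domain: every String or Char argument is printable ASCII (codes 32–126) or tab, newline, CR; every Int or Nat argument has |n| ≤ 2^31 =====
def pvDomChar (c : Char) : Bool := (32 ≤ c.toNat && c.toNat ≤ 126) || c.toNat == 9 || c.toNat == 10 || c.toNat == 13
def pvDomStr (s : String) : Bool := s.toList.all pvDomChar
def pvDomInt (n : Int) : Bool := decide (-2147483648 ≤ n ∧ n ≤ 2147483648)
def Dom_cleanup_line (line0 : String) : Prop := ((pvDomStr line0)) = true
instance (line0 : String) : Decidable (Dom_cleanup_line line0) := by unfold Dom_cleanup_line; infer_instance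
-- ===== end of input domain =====

-- B replaces A's char-by-char quote-state scan (which rebuilds the kept prefix by string
-- accumulation) with a segment-level pass: split on '"', find the first ';' in the
-- even-indexed (outside-quotes) segments, and slice the original line there (idiomatic).


-- ===== PORT A =====
def cleanupALoop : List Char → Bool → List Char → List Char
  | [], _, acc => acc
  | c :: rest, inSt, acc =>
      if !inSt && c == ';' then acc
      else cleanupALoop rest (if c == '"' then !inSt else inSt) (acc ++ [c])

def cleanup_line (line0 : String) : String :=
  let line := line0.toList
  let line := if 0 ≤ PySem.Chars.find line [';'] then cleanupALoop line0.toList false [] else line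
  String.ofList (PySem.Chars.strip line)

-- ===== PORT B =====
def cleanupBFind : List (List Char) → Nat → Nat → Option Nat
  | [], _, _ => none
  | seg :: rest, i, off =>
      if i % 2 == 0 then
        let p := PySem.Chars.find seg [';']
        if 0 ≤ p then some (off + p.toNat)
        else cleanupBFind rest (i + 1) (off + seg.length + 1)
      else cleanupBFind rest (i + 1) (off + seg.length + 1)

def cleanup_line_alt (line0 : String) : String :=
  let cs := line0.toList
  let result :=
    match cleanupBFind (PySem.Chars.splitOn cs ['"']) 0 0 with
    | none => cs
    | some cut => PySem.List.slice cs none (some (Int.ofNat cut))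
  String.ofList (PySem.Chars.strip result)

-- ===== PRECONDITION & SPEC =====
def Spec_cleanup_line (line0 : String) (out : String) : Prop := out = cleanup_line_alt line0
instance (line0 : String) (out : String) : Decidable (Spec_cleanup_line line0 out) := by unfold Spec_cleanup_line; infer_instance

-- ===== CLAIM =====
def Claim_equal_cleanup_line : Prop := ∀ (line0 : String), Dom_cleanup_line line0 → Spec_cleanup_line line0 (cleanup_line line0)

-- ===== LEMMAS AND PROOFS =====

/-- Position of the first unquoted `';'` in `cs`; `st` = inside a `"` block. -/
def posSpec : List Char → Bool → Option Nat
  | [], _ => none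
  | c :: rest, st =>
      if !st && c == ';' then some 0
      else (posSpec rest (if c == '"' then !st else st)).map Nat.succ

lemma cleanupALoop_eq (cs : List Char) (st : Bool) (acc : List Char) :
    cleanupALoop cs st acc = acc ++ (match posSpec cs st with
      | none => cs
      | some k => cs.take k) := by
  induction cs generalizing st acc with
  | nil => simp [cleanupALoop, posSpec]
  | cons c rest ih =>
    simp only [cleanupALoop, posSpec]
    by_cases h : (!st && c == ';') = true
    · simp [h]
    · simp only [h, if_neg, Bool.not_eq_true] at *
      rw [ih]
      cases hp : posSpec rest (if c == '"' then !st else st) <;> simp [hp]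

/-- `glue pre ss` prepends `pre` to the first piece of `ss`. -/
def glue (pre : List Char) : List (List Char) → List (List Char)
  | [] => [pre]
  | h :: t => (pre ++ h) :: t

/-- Simple recursive characterisation of `split('"')`. -/
def simpleSplit : List Char → List (List Char)
  | [] => [[]]
  | c :: rest => if c = '"' then [] :: simpleSplit rest else glue [c] (simpleSplit rest)

lemma simpleSplit_ne_nil (cs : List Char) : simpleSplit cs ≠ [] := by
  cases cs with
  | nil => simp [simpleSplit]
  | cons c rest =>
    simp only [simpleSplit]
    split
    · simp
    · cases h : simpleSplit rest <;> simp [glue]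

lemma splitOn_go_spec (fuel : Nat) (l cur : List Char) (acc : List (List Char))
    (h : l.length ≤ fuel) :
    PySem.Chars.splitOn.go ['"'] fuel l cur acc
      = acc.reverse ++ glue cur.reverse (simpleSplit l) := by
  induction fuel generalizing l cur acc with
  | zero =>
    have : l = [] := by cases l <;> simp_all
    subst this
    simp [PySem.Chars.splitOn.go, simpleSplit, glue]
  | succ fuel ih =>
    cases l with
    | nil => simp [PySem.Chars.splitOn.go, simpleSplit, glue]
    | cons c rest =>
      simp only [PySem.Chars.splitOn.go]
      by_cases hc : c = '"'
      · subst hc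
        rw [if_pos (by simp [List.isPrefixOf])]
        rw [ih _ _ _ (by simpa using Nat.le_of_succ_le_succ (by simpa using h))]
        cases hs : simpleSplit rest with
        | nil => exact absurd hs (simpleSplit_ne_nil rest)
        | cons hd tl => simp [simpleSplit, glue, hs]
      · rw [if_neg (by simp [List.isPrefixOf, Ne.symm hc])]
        rw [ih _ _ _ (by simpa using Nat.le_of_succ_le_succ (by simpa using h))]
        simp only [simpleSplit, if_neg hc, List.reverse_cons]
        cases hs : simpleSplit rest <;> simp [glue]

lemma splitOn_quote (cs : List Char) :
    PySem.Chars.splitOn cs ['"'] = simpleSplit cs := by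
  unfold PySem.Chars.splitOn
  rw [splitOn_go_spec _ _ _ _ (by omega)]
  cases h : simpleSplit cs with
  | nil => exact absurd h (simpleSplit_ne_nil cs)
  | cons hd tl => simp [glue]

lemma singleton_prefix_iff (a : Char) (l : List Char) : [a] <+: l ↔ l.head? = some a := by
  cases l <;> simp [List.cons_prefix_iff]

lemma find_nil_singleton (a : Char) : PySem.Chars.find [] [a] = -1 := rfl

lemma find_cons_self (a : Char) (t : List Char) : PySem.Chars.find (a :: t) [a] = 0 := by
  have hmem : a ∈ a :: t := List.mem_cons_self
  have h0 : 0 ≤ PySem.Chars.find (a :: t) [a] :=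
    (PySem.Chars.find_nonneg_iff _ _).mpr ((List.singleton_infix_iff a _).mpr hmem)
  obtain ⟨hpre, hmin⟩ := PySem.Chars.find_spec h0
  by_contra hne
  have hk : 0 < (PySem.Chars.find (a :: t) [a]).toNat := by omega
  exact hmin 0 hk (by rw [List.drop_zero, singleton_prefix_iff]; rfl)

lemma find_cons_ne (c a : Char) (t : List Char) (hca : c ≠ a) :
    PySem.Chars.find (c :: t) [a]
      = if PySem.Chars.find t [a] = -1 then -1 else PySem.Chars.find t [a] + 1 := by
  by_cases hm : a ∈ t
  · have ht0 : 0 ≤ PySem.Chars.find t [a] :=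
      (PySem.Chars.find_nonneg_iff _ _).mpr ((List.singleton_infix_iff a _).mpr hm)
    have hc0 : 0 ≤ PySem.Chars.find (c :: t) [a] :=
      (PySem.Chars.find_nonneg_iff _ _).mpr
        ((List.singleton_infix_iff a _).mpr (List.mem_cons_of_mem c hm))
    obtain ⟨hpreT, hminT⟩ := PySem.Chars.find_spec ht0
    obtain ⟨hpreC, hminC⟩ := PySem.Chars.find_spec hc0
    set k := (PySem.Chars.find (c :: t) [a]).toNat with hkdef
    set k' := (PySem.Chars.find t [a]).toNat with hk'def
    have hkpos : 0 < k := by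
      by_contra h
      have : k = 0 := by omega
      rw [this] at hpreC
      rw [singleton_prefix_iff] at hpreC
      simp at hpreC
      exact hca hpreC
    have hdropC : [a] <+: List.drop (k - 1) t := by
      have heq : List.drop k (c :: t) = List.drop (k - 1) t := by
        rw [show k = (k - 1) + 1 by omega]
        simp
      rwa [heq] at hpreC
    have hminC' : ∀ i < k - 1, ¬ [a] <+: List.drop i t := by
      intro i hi
      have := hminC (i + 1) (by omega)
      simpa using this
    have hkk : k - 1 = k' := by
      rcases Nat.lt_trichotomy (k - 1) k' with h | h | h
      · exact absurd hdropC (hminT _ h)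
      · exact h
      · exact absurd hpreT (hminC' _ h)
    have htne : ¬ PySem.Chars.find t [a] = -1 := by omega
    rw [if_neg htne]
    omega
  · have hnt : PySem.Chars.find t [a] = -1 :=
      (PySem.Chars.find_eq_neg_one_iff _ _).mpr (by
        simp [List.singleton_infix_iff, hm])
    have hnc : PySem.Chars.find (c :: t) [a] = -1 :=
      (PySem.Chars.find_eq_neg_one_iff _ _).mpr (by
        simp [List.singleton_infix_iff, hm, hca.symm])
    simp [hnt, hnc]

lemma posSpec_mem (cs : List Char) (st : Bool) (k : Nat) (h : posSpec cs st = some k) :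
    ';' ∈ cs := by
  induction cs generalizing st k with
  | nil => simp [posSpec] at h
  | cons c rest ih =>
    simp only [posSpec] at h
    by_cases hc : (!st && c == ';') = true
    · simp only [hc, if_pos] at h
      have : c = ';' := by
        cases hcc : c == ';' <;> simp_all
      simp [this]
    · simp only [hc, if_neg, Bool.not_eq_true] at h
      cases hp : posSpec rest (if c == '"' then !st else st) with
      | none => rw [hp] at h; simp at h
      | some k' => exact List.mem_cons_of_mem _ (ih _ _ hp)

/-- One segment step: consuming a non-quote head char shifts the offset by one. -/
lemma cleanupBFind_consSeg (c : Char) (h : List Char) (t : List (List Char)) (i off : Nat)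
    (hcond : c = ';' → i % 2 ≠ 0) :
    cleanupBFind ((c :: h) :: t) i off = cleanupBFind (h :: t) i (off + 1) := by
  have hoff : off + (c :: h).length + 1 = off + 1 + h.length + 1 := by
    simp only [List.length_cons]; omega
  by_cases hpar : i % 2 = 0
  · have hb : (i % 2 == 0) = true := by simpa using hpar
    have hc : c ≠ ';' := fun hceq => hcond hceq hpar
    simp only [cleanupBFind, hb, if_pos]
    rw [find_cons_ne c ';' h hc]
    by_cases hft : PySem.Chars.find h [';'] = -1
    · rw [if_pos hft, hft]
      rw [if_neg (by norm_num), if_neg (by norm_num)]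
      rw [hoff]
    · have h0 : 0 ≤ PySem.Chars.find h [';'] := by
        have := PySem.Chars.neg_one_le_find h [';']
        omega
      rw [if_neg hft, if_pos (by omega), if_pos h0]
      congr 1
      omega
  · have hb : (i % 2 == 0) = false := by simpa using hpar
    simp only [cleanupBFind, hb, Bool.false_eq_true, if_false]
    rw [hoff]

lemma cleanupBFind_eq (cs : List Char) (st : Bool) (i off : Nat)
    (hpar : (i % 2 = 0) ↔ (st = false)) :
    cleanupBFind (simpleSplit cs) i off = (posSpec cs st).map (off + ·) := by
  induction cs generalizing st i off with
  | nil =>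
    simp only [simpleSplit, posSpec]
    by_cases hp : i % 2 = 0 <;>
      simp [cleanupBFind, hp, find_nil_singleton]
  | cons c rest ih =>
    by_cases hc : c = '"'
    · subst hc
      have hss : simpleSplit ('"' :: rest) = [] :: simpleSplit rest := by
        simp [simpleSplit]
      rw [hss]
      have step : cleanupBFind ([] :: simpleSplit rest) i off
          = cleanupBFind (simpleSplit rest) (i + 1) (off + 1) := by
        by_cases hp : i % 2 = 0 <;>
          simp [cleanupBFind, hp, find_nil_singleton]
      rw [step, ih (!st) (i + 1) (off + 1) (by
        rcases Nat.mod_two_eq_zero_or_one i with hm | hm <;> cases st <;>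
          simp_all [Nat.add_mod])]
      simp only [posSpec]
      have : (!st && ('"' == ';')) = false := by simp
      rw [this]
      simp only [Bool.false_eq_true]
      cases hp : posSpec rest (if ('"' == '"') then !st else st) with
      | none => simp_all
      | some k => simp_all; omega
    · -- c ≠ '"': head segment grows by c
      obtain ⟨h, t, hs⟩ : ∃ h t, simpleSplit rest = h :: t := by
        cases hss : simpleSplit rest with
        | nil => exact absurd hss (simpleSplit_ne_nil rest)
        | cons a b => exact ⟨a, b, rfl⟩
      simp only [simpleSplit, if_neg hc, hs, glue, List.singleton_append]
      by_cases hsc : c = ';' ∧ st = false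
      · obtain ⟨hceq, hst⟩ := hsc
        subst hceq hst
        have hb : (i % 2 == 0) = true := by simpa using hpar.mpr rfl
        simp [cleanupBFind, hb, find_cons_self, posSpec]
      · have hcond : c = ';' → i % 2 ≠ 0 := by
          intro hceq hp
          exact hsc ⟨hceq, hpar.mp hp⟩
        rw [cleanupBFind_consSeg c h t i off hcond]
        rw [← hs, ih st i (off + 1) hpar]
        simp only [posSpec]
        have hnc : (!st && (c == ';')) = false := by
          cases st with
          | false =>
            have : c ≠ ';' := fun hceq => hsc ⟨hceq, rfl⟩
            simp [this]
          | true => simp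
        rw [hnc]
        simp only [Bool.false_eq_true]
        have : (if c == '"' then !st else st) = st := by simp [hc]
        rw [this]
        cases hp : posSpec rest st with
        | none => simp
        | some k => simp; omega

-- ===== VERDICT =====
theorem cleanup_line_spec : Claim_equal_cleanup_line := by
  intro line0 _
  unfold Spec_cleanup_line cleanup_line cleanup_line_alt
  simp only []
  set cs := line0.toList with hcs
  rw [splitOn_quote, cleanupBFind_eq cs false 0 0 (by simp)]
  cases hp : posSpec cs false with
  | none =>
    simp only [Option.map_none]
    by_cases hf : 0 ≤ PySem.Chars.find cs [';']
    · rw [if_pos hf, cleanupALoop_eq, hp]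
      simp
    · rw [if_neg hf]
  | some k =>
    have hmem : ';' ∈ cs := posSpec_mem cs false k hp
    have hf : 0 ≤ PySem.Chars.find cs [';'] :=
      (PySem.Chars.find_nonneg_iff _ _).mpr ((List.singleton_infix_iff _ _).mpr hmem)
    rw [if_pos hf, cleanupALoop_eq, hp]
    simp only [Option.map_some]
    have : (0 + k) = k := by omega
    rw [this]
    have hslice : PySem.List.slice cs none (some (Int.ofNat k)) = cs.take k := by
      exact_mod_cast PySem.List.slice_to_natCast cs k
    rw [hslice]
    simp
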